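-- pv_equiv track=rewrite | github.com/ompnikoutash-source/DraftBot-9000 | app.py | _choose_points_col
-- ===== SOURCE A (Python) =====
-- from typing import Dict, List, Optional, Tuple
--
-- def _choose_points_col(header_by_col: Dict[int, str]) -> Optional[int]:
--     """
--     Chooses the column that contains Fantasy Points inside a section.
--     We prefer exact header "Fantasy Points" but also accept headers containing it.
--     """
--     for c, h in header_by_col.items():
--         if str(h).strip().lower() == "fantasy points":
--             return c
--     for c, h in header_by_col.items():
--         if "fantasy points" in str(h).strip().lower():
--             return c
--     return None
-- ===== SOURCE B (Python) =====
-- from typing import Dict, Optional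
--
-- def _choose_points_col(header_by_col: Dict[int, str]) -> Optional[int]:
--     candidate = None
--     for c, h in header_by_col.items():
--         norm = str(h).strip().lower()
--         if norm == "fantasy points":
--             return c
--         if candidate is None and "fantasy points" in norm:
--             candidate = c
--     return candidate
-- ===== Notes on version B (the rewrite author's own statement) =====
-- stated objective: simpler
-- what changed: Replaces A's two full passes over the dict (exact match pass, then substring pass) with a single pass that returns on the first exact match and otherwise remembers the first substring match as a candidate.
import Mathlib
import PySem

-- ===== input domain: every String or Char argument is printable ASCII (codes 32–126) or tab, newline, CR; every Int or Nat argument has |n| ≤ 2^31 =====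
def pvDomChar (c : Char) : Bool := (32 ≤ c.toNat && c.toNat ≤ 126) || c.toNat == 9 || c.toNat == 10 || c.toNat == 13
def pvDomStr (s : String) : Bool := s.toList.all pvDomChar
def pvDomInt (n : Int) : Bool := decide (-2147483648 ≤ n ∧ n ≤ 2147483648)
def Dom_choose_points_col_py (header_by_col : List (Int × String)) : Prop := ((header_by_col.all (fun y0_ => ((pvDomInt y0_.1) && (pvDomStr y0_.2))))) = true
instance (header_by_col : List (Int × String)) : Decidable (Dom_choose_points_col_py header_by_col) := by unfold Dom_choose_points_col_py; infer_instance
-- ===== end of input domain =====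

-- B replaces A's two passes over the items (exact match, then substring) with one pass that
-- returns on the first exact match and remembers the first substring match; same O(n) cost, simpler.
-- ===== PORT A =====
-- the phrase both programs look for (shared constant)
def pvTarget : List Char := "fantasy points".toList

-- first loop of A: return c on first exact header match
def pvPassExact : List (Int × String) → Option Int
  | [] => none
  | (c, h) :: rest =>
    if PySem.Chars.lower (PySem.Chars.strip h.toList) = pvTarget then some c
    else pvPassExact rest

-- second loop of A: return c on first header containing the phrase
def pvPassSub : List (Int × String) → Option Int
  | [] => none
  | (c, h) :: rest =>
    if PySem.Chars.isIn pvTarget (PySem.Chars.lower (PySem.Chars.strip h.toList)) then some c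
    else pvPassSub rest

def choose_points_col_py (header_by_col : List (Int × String)) : Option Int :=
  match pvPassExact header_by_col with
  | some c => some c
  | none => pvPassSub header_by_col

-- ===== PORT B =====
-- single pass: return on exact match, remember the first substring match as candidate
def pvAltLoop : List (Int × String) → Option Int → Option Int
  | [], candidate => candidate
  | (c, h) :: rest, candidate =>
    let norm := PySem.Chars.lower (PySem.Chars.strip h.toList)
    if norm = pvTarget then some c
    else pvAltLoop rest
      (if candidate.isNone && PySem.Chars.isIn pvTarget norm then some c else candidate)

def choose_points_col_py_alt (header_by_col : List (Int × String)) : Option Int :=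
  pvAltLoop header_by_col none

-- ===== PRECONDITION & SPEC =====
def Spec_choose_points_col_py (header_by_col : List (Int × String)) (out : Option Int) : Prop := out = choose_points_col_py_alt header_by_col
instance (header_by_col : List (Int × String)) (out : Option Int) : Decidable (Spec_choose_points_col_py header_by_col out) := by unfold Spec_choose_points_col_py; infer_instance

-- ===== CLAIM (what is proved, stated in full; the proofs are below) =====
def Claim_equal_choose_points_col_py : Prop := ∀ (header_by_col : List (Int × String)), Dom_choose_points_col_py header_by_col → Spec_choose_points_col_py header_by_col (choose_points_col_py header_by_col)

-- ===== LEMMAS AND PROOFS =====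
-- loop invariant for B's single pass: it returns the first exact match if any,
-- else the carried candidate, else A's substring pass
theorem pvAltLoop_eq (l : List (Int × String)) : ∀ (candidate : Option Int),
    pvAltLoop l candidate =
      match pvPassExact l with
      | some c => some c
      | none => match candidate with
                | some k => some k
                | none => pvPassSub l := by
  induction l with
  | nil => intro candidate; cases candidate <;> simp [pvAltLoop, pvPassExact, pvPassSub]
  | cons p rest ih =>
    intro candidate
    obtain ⟨c, h⟩ := p
    by_cases hex : PySem.Chars.lower (PySem.Chars.strip h.toList) = pvTarget
    · simp [pvAltLoop, pvPassExact, hex]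
    · rw [show pvAltLoop ((c, h) :: rest) candidate = pvAltLoop rest
        (if candidate.isNone && PySem.Chars.isIn pvTarget
            (PySem.Chars.lower (PySem.Chars.strip h.toList)) then some c else candidate)
        from by simp [pvAltLoop, hex], ih]
      cases hpe : pvPassExact rest with
      | some c' => simp [pvPassExact, hex, hpe]
      | none =>
        cases candidate with
        | some k => simp [pvPassExact, hex, hpe]
        | none =>
          by_cases hsub : PySem.Chars.isIn pvTarget
              (PySem.Chars.lower (PySem.Chars.strip h.toList)) = true
          · simp [pvPassExact, pvPassSub, hex, hpe, hsub]
          · simp at hsub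
            simp [pvPassExact, pvPassSub, hex, hpe, hsub]

-- ===== VERDICT (by name: the statement is the Claim_ definition above) =====
theorem choose_points_col_py_spec : Claim_equal_choose_points_col_py := by
  intro l _
  unfold Spec_choose_points_col_py choose_points_col_py choose_points_col_py_alt
  rw [pvAltLoop_eq]
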